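-- pv_equiv track=rewrite | github.com/Naikpranav11/NPTEL | Getting Started with competitive programming/week2/AssignmentQ1.py | sort_partitions
-- ===== SOURCE A (Python) =====
-- def sort_partitions(m, b, lst):
--     k = (m + b - 1) // b  # Calculate the number of partitions (ceiling of m/b)
--     sorted_partitions = []
--
--     for i in range(k):
--         partition = lst[i * b: (i + 1) * b]  # Extract the current partition
--         partition.sort()  # Sort the current partition
--         sorted_partitions.extend(partition)  # Append the sorted partition to the result list
--
--     return sorted_partitions
-- ===== SOURCE B (Python) =====
-- def sort_partitions(m, b, lst):
--     # One global key-sort instead of k separate block sorts: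
--     # sort (block_index, value) pairs lexicographically and read the values back.
--     k = max((m + b - 1) // b, 0)
--     sub = lst[:k * b]
--     pairs = [(i // b, x) for i, x in enumerate(sub)]
--     pairs.sort()
--     return [x for _, x in pairs]
-- ===== Notes on version B (the rewrite author's own statement) =====
-- stated objective: alternative
-- what changed: Replaces the loop of k separate slice-and-sort passes with a single global lexicographic sort of (block_index, value) pairs built in one enumerate pass over the truncated prefix.
-- outside the precondition, e.g. on sort_partitions(-5, -2, [3, 1, 2]): A returns [3], B returns []
import Mathlib
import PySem

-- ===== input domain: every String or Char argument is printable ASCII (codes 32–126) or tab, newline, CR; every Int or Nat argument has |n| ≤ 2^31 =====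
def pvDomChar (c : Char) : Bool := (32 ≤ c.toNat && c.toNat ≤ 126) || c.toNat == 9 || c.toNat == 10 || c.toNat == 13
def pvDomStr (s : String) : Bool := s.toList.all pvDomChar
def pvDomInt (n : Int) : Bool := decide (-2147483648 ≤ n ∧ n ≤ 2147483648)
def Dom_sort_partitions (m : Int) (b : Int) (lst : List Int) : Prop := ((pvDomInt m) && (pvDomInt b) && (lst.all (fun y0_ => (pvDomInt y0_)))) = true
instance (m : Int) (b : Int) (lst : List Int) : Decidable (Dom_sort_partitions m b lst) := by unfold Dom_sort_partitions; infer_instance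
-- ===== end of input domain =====

-- B replaces A's loop of per-block slice-and-sort passes by one global lexicographic
-- sort of (block_index, value) pairs (objective: alternative, same asymptotic cost).

-- ===== PORT A =====
def sort_partitions (m : Int) (b : Int) (lst : List Int) : List Int :=
  let k := PySem.Int.floordiv (m + b - 1) b
  (PySem.List.pyRange 0 k 1).foldl
    (fun acc i =>
      acc ++ PySem.List.sorted (PySem.List.slice lst (some (i * b)) (some ((i + 1) * b))) (fun x => x) false)
    []

-- ===== PORT B =====
def sort_partitions_alt (m : Int) (b : Int) (lst : List Int) : List Int :=
  let k := max (PySem.Int.floordiv (m + b - 1) b) 0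
  let sub := PySem.List.slice lst none (some (k * b))
  let pairs := (PySem.List.enumerate sub 0).map (fun p => (PySem.Int.floordiv p.1 b, p.2))
  (PySem.List.sorted2 pairs (fun p => p.1) (fun p => p.2) false).map (fun p => p.2)

-- ===== PRECONDITION & SPEC =====
-- Pre_ excludes b = 0, where A raises ZeroDivisionError, and the region b ≤ -1 ∧ m ≤ 1,
-- where A's return value is an accidental artefact of Python's negative-slice arithmetic
-- (a fragment of the list that no block decomposition produces).
def Pre_sort_partitions (m : Int) (b : Int) (lst : List Int) : Prop := 1 ≤ b ∨ (b ≤ -1 ∧ 2 ≤ m)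
instance (m : Int) (b : Int) (lst : List Int) : Decidable (Pre_sort_partitions m b lst) := by unfold Pre_sort_partitions; infer_instance

def pvWitness_sort_partitions : Int × Int × List Int := (5, 2, [3, 1, 2, 0, 7])

def Spec_sort_partitions (m : Int) (b : Int) (lst : List Int) (out : List Int) : Prop := out = sort_partitions_alt m b lst
instance (m : Int) (b : Int) (lst : List Int) (out : List Int) : Decidable (Spec_sort_partitions m b lst out) := by unfold Spec_sort_partitions; infer_instance

-- ===== CLAIM (what is proved, stated in full; the proofs are below) =====
def Claim_equal_sort_partitions : Prop := ∀ (m : Int) (b : Int) (lst : List Int), Dom_sort_partitions m b lst → Pre_sort_partitions m b lst → Spec_sort_partitions m b lst (sort_partitions m b lst)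

-- ===== LEMMAS AND PROOFS =====

-- lexicographic ≤ on (block index, value) pairs
def pvLex (p q : Int × Int) : Prop := p.1 < q.1 ∨ (p.1 = q.1 ∧ p.2 ≤ q.2)

lemma pvLex_trans : ∀ {a c e : Int × Int}, pvLex a c → pvLex c e → pvLex a e := by
  rintro ⟨a1, a2⟩ ⟨c1, c2⟩ ⟨e1, e2⟩ h1 h2
  simp only [pvLex] at *
  omega

lemma pv_insertBy_pairwise {α : Type} (R : α → α → Prop) (before : α → α → Bool)
    (htrans : ∀ a c e, R a c → R c e → R a e)
    (h1 : ∀ a c, before a c = true → R a c)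
    (h2 : ∀ a c, before a c = false → R c a)
    (x : α) : ∀ ys : List α, ys.Pairwise R → (PySem.List.insertBy before x ys).Pairwise R := by
  intro ys
  induction ys with
  | nil => intro _; simp [PySem.List.insertBy]
  | cons y ys ih =>
    intro hp
    rw [List.pairwise_cons] at hp
    by_cases hxy : before x y = true
    · simp only [PySem.List.insertBy, hxy, if_true]
      refine List.Pairwise.cons ?_ (List.Pairwise.cons hp.1 hp.2)
      intro z hz
      rcases List.mem_cons.mp hz with rfl | hz'
      · exact h1 x z hxy
      · exact htrans x y z (h1 x y hxy) (hp.1 z hz')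
    · rw [Bool.not_eq_true] at hxy
      simp only [PySem.List.insertBy, hxy]
      refine List.Pairwise.cons ?_ (ih hp.2)
      intro z hz
      rcases (PySem.List.mem_insertBy before x z ys).mp hz with rfl | hz'
      · exact h2 z y hxy
      · exact hp.1 z hz'

lemma pv_foldl_insertBy_pairwise {α : Type} (R : α → α → Prop) (before : α → α → Bool)
    (htrans : ∀ a c e, R a c → R c e → R a e)
    (h1 : ∀ a c, before a c = true → R a c)
    (h2 : ∀ a c, before a c = false → R c a) :
    ∀ (xs acc : List α), acc.Pairwise R →
      (xs.foldl (fun acc x => PySem.List.insertBy before x acc) acc).Pairwise R := by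
  intro xs
  induction xs with
  | nil => intro acc h; simpa using h
  | cons x xs ih =>
    intro acc h
    simp only [List.foldl_cons]
    exact ih _ (pv_insertBy_pairwise R before htrans h1 h2 x acc h)

lemma pv_sorted2_pairwise (xs : List (Int × Int)) :
    (PySem.List.sorted2 xs (fun p => p.1) (fun p => p.2) false).Pairwise pvLex := by
  unfold PySem.List.sorted2
  simp only [if_neg (by decide : ¬ (false = true))]
  apply pv_foldl_insertBy_pairwise pvLex _ (fun a c e => pvLex_trans)
  · rintro ⟨a1, a2⟩ ⟨c1, c2⟩ h
    simp only [Bool.or_eq_true, Bool.and_eq_true, decide_eq_true_eq, Bool.not_eq_true',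
      decide_eq_false_iff_not] at h
    simp only [pvLex]
    omega
  · rintro ⟨a1, a2⟩ ⟨c1, c2⟩ h
    simp only [Bool.or_eq_false_iff, Bool.and_eq_false_iff, decide_eq_false_iff_not,
      Bool.not_eq_false', decide_eq_true_eq] at h
    simp only [pvLex]
    omega
  · exact List.Pairwise.nil

-- every index of a fitting inside one block gets block number t
lemma pv_enum_block (b : Int) (hb : 0 < b) :
    ∀ (a : List Int) (t off : Int), t * b ≤ off → off + a.length ≤ (t + 1) * b →
      (PySem.List.enumerate a off).map (fun p => (PySem.Int.floordiv p.1 b, p.2)) =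
        a.map (fun v => (t, v)) := by
  intro a
  induction a with
  | nil => intro t off _ _; simp [PySem.List.enumerate_nil]
  | cons x xs ih =>
    intro t off h1 h2
    simp only [List.length_cons] at h2
    rw [PySem.List.enumerate_cons, List.map_cons, List.map_cons]
    have hoff : PySem.Int.floordiv off b = t := by
      rw [PySem.Int.floordiv_eq_iff_of_pos hb]
      constructor
      · exact h1
      · have : (0:Int) ≤ xs.length := Int.natCast_nonneg _
        push_cast at h2
        omega
    rw [hoff, ih t (off + 1) (by omega) (by push_cast at h2 ⊢; omega)]

-- chunk decomposition of the enumerate-and-divide pass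
lemma pv_enum_chunks (b : Int) (hb : 0 < b) :
    ∀ (K : Nat) (t : Int) (s : List Int), (s.length : Int) ≤ K * b →
      (PySem.List.enumerate s (t * b)).map (fun p => (PySem.Int.floordiv p.1 b, p.2)) =
        (List.range K).flatMap
          (fun j => ((s.drop (j * b.toNat)).take b.toNat).map (fun v => (t + j, v))) := by
  intro K
  induction K with
  | zero =>
    intro t s hs
    have : s = [] := by
      have : s.length = 0 := by push_cast at hs; omega
      exact List.eq_nil_of_length_eq_zero this
    subst this
    simp [PySem.List.enumerate_nil]
  | succ K ih =>
    intro t s hs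
    have hnb : (b.toNat : Int) = b := Int.toNat_of_nonneg (le_of_lt hb)
    rw [← List.take_append_drop b.toNat s, PySem.List.enumerate_append, List.map_append]
    have htake : (PySem.List.enumerate (s.take b.toNat) (t * b)).map
        (fun p => (PySem.Int.floordiv p.1 b, p.2)) = (s.take b.toNat).map (fun v => (t, v)) := by
      apply pv_enum_block b hb _ t (t * b) le_rfl
      have : ((s.take b.toNat).length : Int) ≤ b := by
        rw [List.length_take]
        calc ((min b.toNat s.length : Nat) : Int) ≤ (b.toNat : Int) := by
              exact_mod_cast Nat.min_le_left _ _
          _ = b := hnb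
      nlinarith [this]
    rw [htake]
    rw [List.take_append_drop]
    by_cases hlen : b.toNat ≤ s.length
    · have hlt : ((s.take b.toNat).length : Int) = b := by
        rw [List.length_take, Nat.min_eq_left hlen]; exact hnb
      rw [hlt]
      have : t * b + b = (t + 1) * b := by ring
      rw [this, ih (t + 1) (s.drop b.toNat)
        (by rw [List.length_drop]; push_cast [Nat.cast_sub hlen] at hs ⊢; nlinarith)]
      rw [List.range_succ_eq_map, List.flatMap_cons, List.flatMap_map]
      congr 1
      · simp
      · apply List.flatMap_congr
        intro j _
        rw [List.drop_drop]
        have h1 : b.toNat + j * b.toNat = Nat.succ j * b.toNat := by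
          simp [Nat.succ_mul]; omega
        rw [h1]
        congr 1
        funext v
        congr 1
        push_cast
        ring
    · push_neg at hlen
      have hdrop : s.drop b.toNat = [] := List.drop_eq_nil_of_le (by omega)
      have hstake : s.take b.toNat = s := List.take_of_length_le (by omega)
      rw [hdrop, PySem.List.enumerate_nil, List.map_nil, List.append_nil]
      rw [List.range_succ_eq_map, List.flatMap_cons, List.flatMap_map]
      have hrest : (List.range K).flatMap
          (fun j => ((s.drop (Nat.succ j * b.toNat)).take b.toNat).map (fun v => (t + ↑(Nat.succ j), v))) = [] := by
        rw [List.flatMap_congr (g := fun _ => ([] : List (Int × Int))) ?_]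
        · simp
        · intro j _
          have : s.drop (Nat.succ j * b.toNat) = [] := by
            apply List.drop_eq_nil_of_le
            calc s.length ≤ b.toNat := by omega
              _ ≤ Nat.succ j * b.toNat := Nat.le_mul_of_pos_left _ (Nat.succ_pos j)
          simp [this]
      rw [hrest, List.append_nil, hstake]
      simp
      omega

-- the sorted, block-tagged target list is pvLex-pairwise
lemma pv_Z_pairwise (nb : Nat) (s : List Int) (K : Nat) :
    ((List.range K).flatMap
      (fun j => (PySem.List.sorted ((s.drop (j * nb)).take nb) (fun x => x) false).map
        (fun v => ((j : Int), v)))).Pairwise pvLex := by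
  rw [List.pairwise_flatMap]
  constructor
  · intro j _
    rw [List.pairwise_map]
    apply List.Pairwise.imp ?_ (PySem.List.sorted_pairwise ((s.drop (j * nb)).take nb) (fun x => x))
    intro a c h
    exact Or.inr ⟨rfl, h⟩
  · apply List.Pairwise.imp ?_ (List.pairwise_lt_range (n := K))
    intro j1 j2 hj x hx y hy
    rcases List.mem_map.mp hx with ⟨v, _, rfl⟩
    rcases List.mem_map.mp hy with ⟨w, _, rfl⟩
    have hcast : (j1 : Int) < (j2 : Int) := by exact_mod_cast hj
    exact Or.inl hcast

-- ===== VERDICT (by name: the statement is the Claim_ definition above) =====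
theorem sort_partitions_spec : Claim_equal_sort_partitions := by
  intro m b lst _hdom hpre
  simp only [Spec_sort_partitions, sort_partitions, sort_partitions_alt]
  set k0 := PySem.Int.floordiv (m + b - 1) b with hk0def
  have hsplit : k0 ≤ 0 ∨ (0 ≤ k0 ∧ 1 ≤ b) := by
    rcases hpre with hb | ⟨hbneg, hm⟩
    · rcases lt_or_ge k0 0 with h | h
      · exact Or.inl (le_of_lt h)
      · exact Or.inr ⟨h, hb⟩
    · -- b ≤ -1 and 2 ≤ m force a nonpositive partition count
      left
      by_contra hq
      push_neg at hq
      have hdm := PySem.Int.floordiv_mul_add_mod (m + b - 1) b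
      have hmod := PySem.Int.mod_neg_bounds (a := m + b - 1) (b := b) (by omega)
      rw [← hk0def] at hdm
      have h1 : (1:Int) ≤ k0 := hq
      have h2 : k0 * b ≤ b := by nlinarith
      omega
  rcases hsplit with hk | ⟨hk, hb1⟩
  · -- no partitions: both sides are []
    rw [max_eq_right hk, PySem.List.pyRange_one_eq_nil hk, zero_mul]
    rw [show ((0:Int)) = (((0:Nat)):Int) from rfl, PySem.List.slice_to_natCast]
    simp [PySem.List.enumerate_nil, PySem.List.sorted2]
  · -- main case: 0 ≤ k0 partitions
    have hbpos : (0:Int) < b := by omega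
    have hnb : (b.toNat : Int) = b := Int.toNat_of_nonneg (by omega)
    rw [max_eq_left hk]
    set nb := b.toNat with hnbdef
    set kn := k0.toNat with hkndef
    have hknc : (kn : Int) = k0 := Int.toNat_of_nonneg hk
    -- A-side: rewrite to a flatMap of per-block sorts over lst
    rw [PySem.List.foldl_append_eq_flatMap, List.nil_append, PySem.List.pyRange_one]
    have hA : ((List.range (k0 - 0).toNat).map (fun k : Nat => (0:Int) + (k:Int))).flatMap
        (fun i => PySem.List.sorted (PySem.List.slice lst (some (i * b)) (some ((i + 1) * b))) (fun x => x) false) =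
        (List.range kn).flatMap (fun j => PySem.List.sorted ((lst.drop (j * nb)).take nb) (fun x => x) false) := by
      have hkk : (k0 - 0).toNat = kn := by omega
      rw [List.flatMap_map, hkk]
      apply List.flatMap_congr
      intro j _
      have h1 : (0 + (j:Int)) * b = (((j * nb : Nat)):Int) := by push_cast [hnb]; ring
      have h2 : (0 + (j:Int) + 1) * b = (((j * nb + nb : Nat)):Int) := by push_cast [hnb]; ring
      rw [h1, h2, PySem.List.slice_natCast, Nat.add_sub_cancel_left]
    rw [hA]
    -- B-side: the truncated prefix
    have hsub : k0 * b = (((kn * nb : Nat)):Int) := by push_cast [hnb, hknc]; ring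
    rw [hsub, PySem.List.slice_to_natCast]
    set sub := lst.take (kn * nb) with hsubdef
    -- the enumerate-and-divide pass, chunked into blocks
    have hlen : (sub.length : Int) ≤ (kn : Int) * b := by
      have : sub.length ≤ kn * nb := by rw [hsubdef, List.length_take]; omega
      calc (sub.length : Int) ≤ ((kn * nb : Nat) : Int) := by exact_mod_cast this
        _ = (kn : Int) * b := by push_cast [hnb]; ring
    have hpairs := pv_enum_chunks b hbpos kn 0 sub hlen
    rw [zero_mul] at hpairs
    simp only [zero_add] at hpairs
    rw [hpairs]
    -- the global lexicographic sort equals the concatenation of per-block sorts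
    have hZ : PySem.List.sorted2
        ((List.range kn).flatMap (fun j => ((sub.drop (j * nb)).take nb).map (fun v => ((j:Int), v))))
        (fun p => p.1) (fun p => p.2) false =
        (List.range kn).flatMap
          (fun j => (PySem.List.sorted ((sub.drop (j * nb)).take nb) (fun x => x) false).map
            (fun v => ((j:Int), v))) := by
      apply List.eq_of_perm_of_sorted (le := pvLex)
      · intro a c _ _ h1 h2
        obtain ⟨a1, a2⟩ := a
        obtain ⟨c1, c2⟩ := c
        simp only [pvLex] at h1 h2
        obtain ⟨h3, h4⟩ : a1 = c1 ∧ a2 = c2 := by omega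
        rw [h3, h4]
      · exact pv_sorted2_pairwise _
      · exact pv_Z_pairwise nb sub kn
      · refine (PySem.List.sorted2_perm _ _ _ _).trans ?_
        refine List.Perm.flatMap (List.Perm.refl _) ?_
        intro j _
        exact (PySem.List.sorted_perm ((sub.drop (j * nb)).take nb) (fun x => x) false).map _ |>.symm
    rw [hZ, List.map_flatMap]
    -- project the values back out and identify the blocks of sub with the blocks of lst
    apply (List.flatMap_congr ?_).symm
    intro j hj
    have hjlt : j < kn := List.mem_range.mp hj
    have hblock : (sub.drop (j * nb)).take nb = (lst.drop (j * nb)).take nb := by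
      rw [hsubdef, List.drop_take, List.take_take]
      congr 1
      have hmul : (j + 1) * nb ≤ kn * nb := Nat.mul_le_mul_right nb hjlt
      have : j * nb + nb ≤ kn * nb := by
        calc j * nb + nb = (j + 1) * nb := by ring
          _ ≤ kn * nb := hmul
      omega
    rw [hblock, List.map_map]
    simp
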